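-- pv_equiv track=rewrite | github.com/facebookresearch/libri-light | data_preparation/metadata_completion/DuplicateSearch.py | getBaseStringData
-- ===== SOURCE A (Python) =====
-- def getBaseStringData(in_str):
--
--     in_str = in_str.lower()
--     tmp = in_str.split()
--     out = []
--
--     for word in tmp:
--         word = ''.join([char for char in word if char.isalnum()])
--         if len(word) == 0:
--             continue
--         out.append(word)
--
--     return out
-- ===== SOURCE B (Python) =====
-- def getBaseStringData(in_str):
--     in_str = in_str.lower()
--     filtered = ''.join(c for c in in_str if c.isalnum() or c.isspace())
--     return filtered.split()
-- ===== Notes on version B (the rewrite author's own statement) =====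
-- stated objective: simpler
-- what changed: Replaces the split-then-per-word-filter-then-drop-empties loop by one global character filter (keep alphanumerics and whitespace) followed by a single whitespace split().
import Mathlib
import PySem

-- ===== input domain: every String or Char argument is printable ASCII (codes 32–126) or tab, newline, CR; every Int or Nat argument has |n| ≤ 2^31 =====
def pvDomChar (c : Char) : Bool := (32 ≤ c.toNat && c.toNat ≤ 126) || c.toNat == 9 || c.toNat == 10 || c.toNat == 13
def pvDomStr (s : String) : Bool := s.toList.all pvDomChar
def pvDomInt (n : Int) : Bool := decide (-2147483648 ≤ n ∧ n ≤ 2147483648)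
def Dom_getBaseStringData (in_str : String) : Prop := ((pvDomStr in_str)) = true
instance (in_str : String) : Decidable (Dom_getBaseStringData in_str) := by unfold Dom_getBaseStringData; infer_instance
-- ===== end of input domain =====

-- B replaces A's split-then-per-word-alnum-filter-then-drop-empties loop by one global
-- character filter (keep alphanumerics and whitespace) followed by a single split() (simpler).

-- ===== PORT A =====
def getBaseStringData (in_str : String) : List String :=
  let s := PySem.Str.lower in_str
  let tmp := PySem.Str.split₀ s
  -- ''.join([char for char in word if char.isalnum()]) = the string of word's alnum chars
  tmp.foldl (fun out word =>
    let w := String.ofList (word.toList.filter PySem.Chars.isalnum)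
    if PySem.Str.len w = 0 then out else out ++ [w]) []

-- ===== PORT B =====
def getBaseStringData_alt (in_str : String) : List String :=
  let s := PySem.Str.lower in_str
  -- ''.join(c for c in in_str if c.isalnum() or c.isspace())
  let filtered := String.ofList
    (s.toList.filter (fun c => PySem.Chars.isalnum c || PySem.Chars.isspace c))
  PySem.Str.split₀ filtered

-- ===== PRECONDITION & SPEC =====
def Spec_getBaseStringData (in_str : String) (out : List String) : Prop := out = getBaseStringData_alt in_str
instance (in_str : String) (out : List String) : Decidable (Spec_getBaseStringData in_str out) := by unfold Spec_getBaseStringData; infer_instance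

-- ===== CLAIM (what is proved, stated in full; the proofs are below) =====
def Claim_equal_getBaseStringData : Prop := ∀ (in_str : String), Dom_getBaseStringData in_str → Spec_getBaseStringData in_str (getBaseStringData in_str)

-- ===== LEMMAS AND PROOFS =====

-- simple recursive model of PySem.Chars.split₀.go with the accumulator removed
def myGo : List Char → List Char → List (List Char)
  | [], cur => if cur.isEmpty then [] else [cur.reverse]
  | c :: cs, cur =>
      if PySem.Chars.isspace c then
        if cur.isEmpty then myGo cs [] else cur.reverse :: myGo cs []
      else myGo cs (c :: cur)

theorem go_eq_myGo : ∀ (cs cur : List Char) (acc : List (List Char)),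
    PySem.Chars.split₀.go cs cur acc = acc.reverse ++ myGo cs cur := by
  intro cs
  induction cs with
  | nil =>
      intro cur acc
      simp only [PySem.Chars.split₀.go, myGo]
      split_ifs <;> simp
  | cons c cs ih =>
      intro cur acc
      simp only [PySem.Chars.split₀.go, myGo]
      split_ifs with h1 h2 <;> simp [ih]

theorem split₀_eq_myGo (cs : List Char) : PySem.Chars.split₀ cs = myGo cs [] := by
  simpa using go_eq_myGo cs [] []

-- the heart: filtering out non-alnum/non-space chars then splitting = split, filter each
-- word to its alnum chars, drop the words that became empty
theorem myGo_filter : ∀ (cs cur : List Char),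
    myGo (cs.filter (fun c => PySem.Chars.isalnum c || PySem.Chars.isspace c))
        (cur.filter PySem.Chars.isalnum)
      = ((myGo cs cur).map (fun w => w.filter PySem.Chars.isalnum)).filter
          (fun w => !w.isEmpty) := by
  intro cs
  induction cs with
  | nil =>
      intro cur
      simp only [List.filter_nil, myGo]
      by_cases hc : cur = []
      · subst hc; simp
      · by_cases hf : cur.filter PySem.Chars.isalnum = []
        · simp [hc, hf, List.isEmpty_iff, List.filter_reverse]
        · simp [hc, hf, List.isEmpty_iff, List.filter_reverse]
  | cons c cs ih =>
      intro cur
      by_cases hs : PySem.Chars.isspace c = true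
      · have hk : (PySem.Chars.isalnum c || PySem.Chars.isspace c) = true := by simp [hs]
        rw [List.filter_cons]
        simp only [hk, if_true]
        rw [myGo, myGo]
        simp only [hs, if_true]
        by_cases hc : cur = []
        · subst hc; simpa using ih []
        · by_cases hf : cur.filter PySem.Chars.isalnum = []
          · simp [hc, hf, List.isEmpty_iff, List.filter_reverse, ← ih []]
          · simp [hc, hf, List.isEmpty_iff, List.filter_reverse, ← ih []]
      · by_cases ha : PySem.Chars.isalnum c = true
        · have hk : (PySem.Chars.isalnum c || PySem.Chars.isspace c) = true := by simp [ha]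
          rw [List.filter_cons]
          simp only [hk, if_true]
          rw [myGo, myGo]
          simp only [hs, Bool.false_eq_true, if_false]
          have hcc : c :: cur.filter PySem.Chars.isalnum
              = (c :: cur).filter PySem.Chars.isalnum := by simp [ha]
          rw [hcc, ih (c :: cur)]
        · have hk : (PySem.Chars.isalnum c || PySem.Chars.isspace c) = false := by
            simp [ha, hs]
          rw [List.filter_cons]
          simp only [hk, Bool.false_eq_true, if_false]
          conv_rhs => rw [myGo]
          simp only [hs, Bool.false_eq_true, if_false]
          have hcc : cur.filter PySem.Chars.isalnum
              = (c :: cur).filter PySem.Chars.isalnum := by simp [ha]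
          rw [hcc, ih (c :: cur)]

-- A's append-unless-empty loop, as filter-then-map
theorem foldl_skip_append :
    ∀ (l : List String) (acc : List String),
      l.foldl (fun out word =>
          if PySem.Str.len (String.ofList (word.toList.filter PySem.Chars.isalnum)) = 0
          then out
          else out ++ [String.ofList (word.toList.filter PySem.Chars.isalnum)]) acc
        = acc ++ ((l.filter
              (fun word => !(word.toList.filter PySem.Chars.isalnum).isEmpty)).map
            (fun word => String.ofList (word.toList.filter PySem.Chars.isalnum))) := by
  intro l
  induction l with
  | nil => intro acc; simp
  | cons x l ih =>
      intro acc
      simp only [List.foldl_cons, List.filter_cons]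
      by_cases h : (x.toList.filter PySem.Chars.isalnum).isEmpty = true
      · have hl : PySem.Str.len (String.ofList (x.toList.filter PySem.Chars.isalnum)) = 0 := by
          simp [PySem.Str.len, List.isEmpty_iff.mp h]
        rw [if_pos hl, ih]
        simp [h]
      · have hl : ¬ PySem.Str.len (String.ofList (x.toList.filter PySem.Chars.isalnum)) = 0 := by
          simp only [List.isEmpty_iff] at h
          simp [PySem.Str.len, List.length_eq_zero_iff, h]
        rw [if_neg hl, ih]
        simp [h]

theorem toList_injective : Function.Injective String.toList := by
  intro a b h
  have := congrArg String.ofList h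
  simpa using this

-- ===== VERDICT (by name: the statement is the Claim_ definition above) =====
theorem getBaseStringData_spec : Claim_equal_getBaseStringData := by
  intro in_str _
  unfold Spec_getBaseStringData
  unfold getBaseStringData getBaseStringData_alt
  dsimp only
  apply List.map_injective_iff.mpr toList_injective
  rw [foldl_skip_append]
  rw [List.nil_append, PySem.Str.split₀_map_toList, String.toList_ofList, split₀_eq_myGo]
  have hm := myGo_filter (PySem.Str.lower in_str).toList []
  simp only [List.filter_nil] at hm
  rw [hm, ← split₀_eq_myGo]
  have e1 : (String.toList ∘ fun word => String.ofList (List.filter PySem.Chars.isalnum word.toList))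
      = (fun w => List.filter PySem.Chars.isalnum w) ∘ String.toList := by
    funext word; simp
  have e2 : (fun word : String => !(List.filter PySem.Chars.isalnum word.toList).isEmpty)
      = ((fun w => !w.isEmpty) ∘ fun w => List.filter PySem.Chars.isalnum w) ∘ String.toList := rfl
  rw [List.map_map, e1, e2, ← List.map_map, ← List.filter_map, PySem.Str.split₀_map_toList]
  rw [List.filter_map]
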